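-- pv_equiv track=rewrite | github.com/mattclarke/advent_of_code_2024 | day_21/solver.py | solve_dpad
-- ===== SOURCE A (Python) =====
-- def solve_dpad(code, best=1000000000):
--     current = "A"
--     result = ""
--     for c in code:
--         if current == "A" and c == "<":
--             result += "v<<"
--         elif current == "A" and c == "v":
--             result += "v<"
--         elif current == "A" and c == "^":
--             result += "<"
--         elif current == "A" and c == ">":
--             result += "v"
--
--         elif current == "^" and c == "<":
--             result += "v<"
--         elif current == "^" and c == "v":
--             result += "v"
--         elif current == "^" and c == "A":
--             result += ">"
--         elif current == "^" and c == ">":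
--             result += "v>"
--
--         elif current == ">" and c == "<":
--             result += "<<"
--         elif current == ">" and c == "v":
--             result += "<"
--         elif current == ">" and c == "A":
--             result += "^"
--         elif current == ">" and c == "^":
--             result += "^<"
--
--         elif current == "v" and c == "<":
--             result += "<"
--         elif current == "v" and c == "^":
--             result += "^"
--         elif current == "v" and c == "A":
--             result += "^>"
--         elif current == "v" and c == ">":
--             result += ">"
--
--         elif current == "<" and c == "v":
--             result += ">"
--         elif current == "<" and c == "^":
--             result += ">^"
--         elif current == "<" and c == "A":
--             result += ">>^"
--         elif current == "<" and c == ">":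
--             result += ">>"
--         elif current == c:
--             pass
--         else:
--             assert False, f"{current}, {c}"
--         result += "A"
--         current = c
--     return result
-- ===== SOURCE B (Python) =====
-- def solve_dpad(code, best=1000000000):
--     pos = {"A": (0, 2), "^": (0, 1), "<": (1, 0), "v": (1, 1), ">": (1, 2)}
--     r1, c1 = pos["A"]
--     parts = []
--     for c in code:
--         r2, c2 = pos[c]
--         vert = "v" * (r2 - r1) + "^" * (r1 - r2)
--         horiz = "<" * (c1 - c2) + ">" * (c2 - c1)
--         parts.append(horiz + vert if c1 == 0 and r2 == 0 else vert + horiz)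
--         parts.append("A")
--         r1, c1 = r2, c2
--     return "".join(parts)
-- ===== Notes on version B (the rewrite author's own statement) =====
-- stated objective: simpler
-- what changed: Replaces the 22-branch lookup table of pairwise move strings by coordinate geometry on the directional pad: each key gets a (row,col) position, the move is built as repeated vertical and horizontal arrow characters from the coordinate deltas, vertical-first except in the one gap-crossing case (current column 0, target row 0).
import Mathlib
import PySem

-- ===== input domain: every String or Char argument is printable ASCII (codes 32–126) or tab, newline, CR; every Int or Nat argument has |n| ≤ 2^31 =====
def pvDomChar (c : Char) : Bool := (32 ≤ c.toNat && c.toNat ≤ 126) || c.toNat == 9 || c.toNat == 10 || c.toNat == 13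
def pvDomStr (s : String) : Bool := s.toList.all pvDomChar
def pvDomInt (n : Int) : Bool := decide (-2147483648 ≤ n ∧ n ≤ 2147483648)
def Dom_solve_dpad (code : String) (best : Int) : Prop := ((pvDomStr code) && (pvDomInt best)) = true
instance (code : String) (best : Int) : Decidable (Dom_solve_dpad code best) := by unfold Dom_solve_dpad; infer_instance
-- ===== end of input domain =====

-- B replaces A's 22-branch pairwise move table by (row,col) coordinate geometry on the
-- directional pad (objective: simpler).

-- ===== PORT A =====
-- A's if/elif chain selecting the move string for the pair (current, c);
-- the final 'else: assert False' branch (Python raises AssertionError) is unreachable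
-- under Pre_solve_dpad and yields "" here.
def pvPieceA (current : Char) (c : Char) : String :=
  if current = 'A' ∧ c = '<' then "v<<"
  else if current = 'A' ∧ c = 'v' then "v<"
  else if current = 'A' ∧ c = '^' then "<"
  else if current = 'A' ∧ c = '>' then "v"
  else if current = '^' ∧ c = '<' then "v<"
  else if current = '^' ∧ c = 'v' then "v"
  else if current = '^' ∧ c = 'A' then ">"
  else if current = '^' ∧ c = '>' then "v>"
  else if current = '>' ∧ c = '<' then "<<"
  else if current = '>' ∧ c = 'v' then "<"
  else if current = '>' ∧ c = 'A' then "^"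
  else if current = '>' ∧ c = '^' then "^<"
  else if current = 'v' ∧ c = '<' then "<"
  else if current = 'v' ∧ c = '^' then "^"
  else if current = 'v' ∧ c = 'A' then "^>"
  else if current = 'v' ∧ c = '>' then ">"
  else if current = '<' ∧ c = 'v' then ">"
  else if current = '<' ∧ c = '^' then ">^"
  else if current = '<' ∧ c = 'A' then ">>^"
  else if current = '<' ∧ c = '>' then ">>"
  else if current = c then ""
  else ""  -- Python: assert False (AssertionError); excluded by Pre_solve_dpad

def solve_dpad (code : String) (best : Int) : String :=
  (code.toList.foldl
    (fun (st : Char × String) (c : Char) => (c, st.2 ++ pvPieceA st.1 c ++ "A"))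
    ('A', "")).2

-- ===== PORT B =====
-- coordinates of each key on the directional pad; an unknown key is a KeyError in
-- Python B (excluded by Pre_solve_dpad), defaulted here.
def pvPos (c : Char) : Int × Int :=
  if c = 'A' then (0, 2)
  else if c = '^' then (0, 1)
  else if c = '<' then (1, 0)
  else if c = 'v' then (1, 1)
  else if c = '>' then (1, 2)
  else (0, 2)

-- the move string from (r1,c1) to the position of c ('v'*(r2-r1) + '^'*(r1-r2) etc.,
-- Python's negative repetition count giving the empty string = Int.toNat)
def pvMoveB (r1 c1 : Int) (c : Char) : String :=
  let p := pvPos c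
  let vert := String.mk (List.replicate (p.1 - r1).toNat 'v')
              ++ String.mk (List.replicate (r1 - p.1).toNat '^')
  let horiz := String.mk (List.replicate (c1 - p.2).toNat '<')
               ++ String.mk (List.replicate (p.2 - c1).toNat '>')
  if c1 = 0 ∧ p.1 = 0 then horiz ++ vert else vert ++ horiz

def solve_dpad_alt (code : String) (best : Int) : String :=
  (code.toList.foldl
    (fun (st : (Int × Int) × String) (c : Char) =>
      (pvPos c, st.2 ++ pvMoveB st.1.1 st.1.2 c ++ "A"))
    (pvPos 'A', "")).2

-- ===== PRECONDITION & SPEC =====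
-- Pre_ excludes codes containing a character outside the five pad keys: there Python A
-- raises AssertionError (and Python B raises KeyError).
def Pre_solve_dpad (code : String) (best : Int) : Prop :=
  code.toList.all (fun c => c ∈ (['A', '^', 'v', '<', '>'] : List Char)) = true
instance (code : String) (best : Int) : Decidable (Pre_solve_dpad code best) := by
  unfold Pre_solve_dpad; infer_instance
def pvWitness_solve_dpad : String × Int := ("<^Av>A", 7)

def Spec_solve_dpad (code : String) (best : Int) (out : String) : Prop := out = solve_dpad_alt code best
instance (code : String) (best : Int) (out : String) : Decidable (Spec_solve_dpad code best out) := by unfold Spec_solve_dpad; infer_instance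

-- ===== CLAIM (what is proved, stated in full; the proofs are below) =====
def Claim_equal_solve_dpad : Prop := ∀ (code : String) (best : Int), Dom_solve_dpad code best → Pre_solve_dpad code best → Spec_solve_dpad code best (solve_dpad code best)

-- ===== LEMMAS AND PROOFS =====

-- on the five pad keys, A's table entry equals B's geometric move string
theorem pvPiece_eq_move :
    ∀ cur ∈ ['A', '^', 'v', '<', '>'], ∀ c ∈ ['A', '^', 'v', '<', '>'],
      pvPieceA cur c = pvMoveB (pvPos cur).1 (pvPos cur).2 c := by
  intro cur hcur c hc
  fin_cases hcur <;> fin_cases hc <;> rfl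

theorem pvLoop_eq (cs : List Char) :
    ∀ cur ∈ ['A', '^', 'v', '<', '>'], (∀ c ∈ cs, c ∈ ['A', '^', 'v', '<', '>']) →
    ∀ res : String,
      (cs.foldl (fun (st : Char × String) c => (c, st.2 ++ pvPieceA st.1 c ++ "A")) (cur, res)).2
      = (cs.foldl (fun (st : (Int × Int) × String) c =>
          (pvPos c, st.2 ++ pvMoveB st.1.1 st.1.2 c ++ "A")) (pvPos cur, res)).2 := by
  induction cs with
  | nil => intro cur _ _ res; rfl
  | cons c cs ih =>
      intro cur hcur hall res
      have hc : c ∈ ['A', '^', 'v', '<', '>'] := hall c (List.mem_cons_self ..)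
      simp only [List.foldl_cons]
      rw [pvPiece_eq_move cur hcur c hc]
      exact ih c hc (fun x hx => hall x (List.mem_cons_of_mem _ hx)) _

-- ===== VERDICT (by name: the statement is the Claim_ definition above) =====
theorem solve_dpad_spec : Claim_equal_solve_dpad := by
  intro code best _ hpre
  unfold Spec_solve_dpad solve_dpad solve_dpad_alt
  exact pvLoop_eq code.toList 'A' (by decide)
    (by simpa [Pre_solve_dpad, List.all_eq_true] using hpre) ""
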